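-- pv_equiv track=rewrite | github.com/traplordpanda/pythonUMBC | python/pythonlabs/mywork/chapter11/example.py | offset
-- ===== SOURCE A (Python) =====
-- off_cache = {}
--
-- def offset(n: int) -> int:
--     if n < 0: return 0
--     elif n == 1: return 1
--     elif n in off_cache: return off_cache[n]
--     k = lambda n: (n >> 1) * (1 - (n & 1)) + n * (n & 1)
--     r = sum(k(i) for i in range(n, 0, -1))
--     off_cache[n] = r
--     return r
-- ===== SOURCE B (Python) =====
-- def offset(n: int) -> int:
--     # closed form: sum of odd i in 1..n is ((n+1)//2)**2,
--     # sum of i//2 for even i in 1..n is triangular number of n//2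
--     if n < 0:
--         return 0
--     o = (n + 1) // 2
--     e = n // 2
--     return o * o + e * (e + 1) // 2
-- ===== Notes on version B (the rewrite author's own statement) =====
-- stated objective: faster
-- what changed: Replaced the O(n) summation loop (and its memo cache) by a closed-form formula: count-of-odds squared plus the triangular number of n//2.
import Mathlib
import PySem

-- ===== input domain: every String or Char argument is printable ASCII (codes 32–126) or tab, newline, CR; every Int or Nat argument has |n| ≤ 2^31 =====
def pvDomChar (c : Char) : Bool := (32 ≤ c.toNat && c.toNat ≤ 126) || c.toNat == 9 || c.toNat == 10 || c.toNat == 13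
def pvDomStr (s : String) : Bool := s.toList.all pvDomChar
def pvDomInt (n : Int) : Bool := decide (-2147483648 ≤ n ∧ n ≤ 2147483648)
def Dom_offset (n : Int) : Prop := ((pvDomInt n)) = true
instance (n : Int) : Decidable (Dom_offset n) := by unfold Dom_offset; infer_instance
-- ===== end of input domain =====

-- B replaces A's O(n) summation loop (and its memo cache) by a closed-form formula;
-- A's module-level cache only memoizes identical values, the return value is unaffected, so the port omits it.


-- ===== PORT A =====
-- Python's 'i >> 1' on int is floor division by 2 and 'i & 1' is i mod 2 (exact for all ints,
-- arithmetic shift / two's complement), ported with PySem.Int.floordiv / PySem.Int.mod.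
def offsetK (i : Int) : Int :=
  (PySem.Int.floordiv i 2) * (1 - PySem.Int.mod i 2) + i * (PySem.Int.mod i 2)

def offset (n : Int) : Int :=
  if n < 0 then 0
  else if n = 1 then 1
  else (PySem.List.pyRange n 0 (-1)).foldl (fun r i => r + offsetK i) 0

-- ===== PORT B =====
def offset_alt (n : Int) : Int :=
  if n < 0 then 0
  else
    let o := PySem.Int.floordiv (n + 1) 2
    let e := PySem.Int.floordiv n 2
    o * o + PySem.Int.floordiv (e * (e + 1)) 2

-- ===== PRECONDITION & SPEC =====
def Spec_offset (n : Int) (out : Int) : Prop := out = offset_alt n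
instance (n : Int) (out : Int) : Decidable (Spec_offset n out) := by unfold Spec_offset; infer_instance

-- ===== CLAIM (what is proved, stated in full; the proofs are below) =====
def Claim_equal_offset : Prop := ∀ (n : Int), Dom_offset n → Spec_offset n (offset n)

-- ===== LEMMAS AND PROOFS =====

theorem fdiv_two (a : Int) : a.fdiv 2 = a / 2 := by rw [Int.fdiv_eq_ediv]; simp

theorem fmod_two (a : Int) : a.fmod 2 = a % 2 := by rw [Int.fmod_eq_emod]; simp

theorem offsetK_closed (i : Int) :
    offsetK i = i / 2 * (1 - i % 2) + i * (i % 2) := by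
  simp [offsetK, PySem.Int.floordiv, PySem.Int.mod, fdiv_two, fmod_two]

theorem offset_alt_closed (n : Int) (hn : 0 ≤ n) :
    offset_alt n = (n + 1) / 2 * ((n + 1) / 2) + n / 2 * (n / 2 + 1) / 2 := by
  simp [offset_alt, PySem.Int.floordiv, if_neg (not_lt.mpr hn), fdiv_two]

theorem offset_step (k : Int) (hk : 0 ≤ k) :
    (k+1)/2 * (1 - (k+1)%2) + (k+1)*((k+1)%2)
      + ((k+1)/2 * ((k+1)/2) + k/2 * (k/2+1) / 2)
    = (k+2)/2 * ((k+2)/2) + (k+1)/2 * ((k+1)/2 + 1) / 2 := by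
  rcases Int.even_or_odd k with ⟨t, ht⟩ | ⟨t, ht⟩
  · have ht' : k = 2 * t := by omega
    subst ht'
    obtain ⟨u, hu⟩ := Int.even_mul_succ_self t
    have e1 : (2*t+1)/2 = t := by omega
    have e2 : (2*t+2)/2 = t+1 := by omega
    have e3 : 2*t/2 = t := by omega
    have m1 : (2*t+1)%2 = 1 := by omega
    rw [e1, e2, e3, m1]
    have d4 : t*(t+1)/2 = u := by omega
    rw [d4]
    nlinarith [hu]
  · subst ht
    obtain ⟨u, hu⟩ := Int.even_mul_succ_self t
    have e1 : (2*t+1+1)/2 = t+1 := by omega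
    have e2 : (2*t+1+2)/2 = t+1 := by omega
    have e3 : (2*t+1)/2 = t := by omega
    have m1 : (2*t+1+1)%2 = 0 := by omega
    rw [e1, e2, e3, m1]
    have d4 : t*(t+1)/2 = u := by omega
    have hv : (t+1)*(t+1+1) = (u+t+1)+(u+t+1) := by nlinarith [hu]
    have d5 : (t+1)*(t+1+1)/2 = u+t+1 := by omega
    rw [d4, d5]
    nlinarith [hu]

theorem sum_offsetK (m : Nat) :
    ((PySem.List.pyRange (m : Int) 0 (-1)).map offsetK).sum = offset_alt (m : Int) := by
  induction m with
  | zero =>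
      simp [PySem.List.pyRange_neg_one_eq_nil (by omega : (0:Int) ≤ 0), offset_alt,
            PySem.Int.floordiv]
  | succ k ih =>
      have hlt : (0:Int) < ((k + 1 : Nat) : Int) := by push_cast; omega
      rw [PySem.List.pyRange_neg_one_cons hlt]
      have hcast : ((k + 1 : Nat) : Int) - 1 = (k : Int) := by push_cast; ring
      rw [List.map_cons, List.sum_cons, hcast, ih]
      have hk1 : ((k + 1 : Nat) : Int) = (k : Int) + 1 := by push_cast; ring
      rw [hk1, offsetK_closed, offset_alt_closed _ (by positivity),
          offset_alt_closed _ (by positivity)]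
      have h12 : (k : Int) + 1 + 1 = (k : Int) + 2 := by ring
      rw [h12]
      linarith [offset_step (k : Int) (by positivity)]

theorem foldl_add_offsetK (l : List Int) (init : Int) :
    l.foldl (fun r i => r + offsetK i) init = init + (l.map offsetK).sum := by
  induction l generalizing init with
  | nil => simp
  | cons x xs ih => simp [List.foldl_cons, ih]; ring

-- ===== VERDICT (by name: the statement is the Claim_ definition above) =====
theorem offset_spec : Claim_equal_offset := by
  intro n _
  unfold Spec_offset offset
  by_cases hneg : n < 0
  · simp [hneg, offset_alt]
  · simp only [if_neg hneg]
    obtain ⟨m, rfl⟩ := Int.eq_ofNat_of_zero_le (not_lt.mp hneg)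
    by_cases h1 : (m : Int) = 1
    · simp [h1, offset_alt, PySem.Int.floordiv]
    · rw [if_neg h1, foldl_add_offsetK, zero_add, sum_offsetK]
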